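-- pv_equiv track=rewrite | github.com/jyolx/evRebalance | generate_strategy.py | generate_all_strategy
-- ===== SOURCE A (Python) =====
-- def feasible_actions(agent, agents, action_set, congestion, threshold=2):
--     '''Determine feasible actions for an agent based on congestion.'''
--     current_block = agents[agent]['block']
--     actions = action_set[agent]
--     feasible = []
--     for action in actions:
--         if action == current_block:
--             feasible.append(action)
--         else:
--             if congestion.get(current_block, {}).get(action, 0) < threshold:
--                 feasible.append(action)
--     return feasible
--
-- def generate_all_strategy(agents, action_set, congestion):
--     '''Generate all possible strategy profiles for the agents.'''
--     from itertools import product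
--     agent_list = list(agents.keys())
--     action_lists = [feasible_actions(agent, agents, action_set, congestion) for agent in agent_list]
--     all_profiles = []
--     for actions in product(*action_lists):
--         profile = {agent: action for agent, action in zip(agent_list, actions)}
--         all_profiles.append(profile)
--     return all_profiles
-- ===== SOURCE B (Python) =====
-- def generate_all_strategy(agents, action_set, congestion):
--     '''Enumerate strategy profiles by mixed-radix decoding of a single counter:
--     profile #idx is obtained by repeated divmod of idx by the feasible-action
--     counts (last agent = least significant digit), with no itertools.'''
--     agent_list = list(agents.keys())
--     action_lists = []
--     for agent in agent_list:
--         block = agents[agent]['block']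
--         cong = congestion.get(block, {})
--         action_lists.append([a for a in action_set[agent]
--                              if a == block or cong.get(a, 0) < 2])
--     total = 1
--     for acts in action_lists:
--         total *= len(acts)
--     profiles = []
--     for idx in range(total):
--         rem = idx
--         picks = []
--         for acts in reversed(action_lists):
--             rem, d = divmod(rem, len(acts))
--             picks.append(acts[d])
--         picks.reverse()
--         profiles.append(dict(zip(agent_list, picks)))
--     return profiles
-- ===== Notes on version B (the rewrite author's own statement) =====
-- stated objective: alternative
-- what changed: B drops itertools.product entirely: it multiplies the feasible-action counts into a single total and reconstructs profile #idx for idx in range(total) by mixed-radix decoding (repeated divmod of idx by each list's length, last agent least significant), instead of generating the tuples by nested iteration.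
import Mathlib
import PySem

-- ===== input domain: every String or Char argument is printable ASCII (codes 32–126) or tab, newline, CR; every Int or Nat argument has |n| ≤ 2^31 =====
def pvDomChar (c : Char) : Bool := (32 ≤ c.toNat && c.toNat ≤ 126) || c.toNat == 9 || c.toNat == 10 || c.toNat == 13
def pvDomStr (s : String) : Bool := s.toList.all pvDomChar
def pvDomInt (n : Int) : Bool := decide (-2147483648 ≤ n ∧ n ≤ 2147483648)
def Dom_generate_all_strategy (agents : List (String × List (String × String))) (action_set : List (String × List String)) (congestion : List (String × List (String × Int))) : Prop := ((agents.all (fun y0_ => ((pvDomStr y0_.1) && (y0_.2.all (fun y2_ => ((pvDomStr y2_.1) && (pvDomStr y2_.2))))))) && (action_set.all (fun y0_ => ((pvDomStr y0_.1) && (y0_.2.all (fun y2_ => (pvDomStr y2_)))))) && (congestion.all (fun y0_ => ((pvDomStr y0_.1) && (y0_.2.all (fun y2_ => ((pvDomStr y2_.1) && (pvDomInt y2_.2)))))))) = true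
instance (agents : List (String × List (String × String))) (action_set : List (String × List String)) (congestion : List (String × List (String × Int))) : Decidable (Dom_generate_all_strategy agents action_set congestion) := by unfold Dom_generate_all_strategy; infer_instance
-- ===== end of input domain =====

-- B replaces itertools.product by mixed-radix arithmetic: one counter over range(total) decoded by
-- repeated divmod into the per-agent choices (objective: alternative algorithm, same cost).

-- ===== PORT A =====
-- feasible_actions: Option = none exactly where Python raises KeyError (agents[agent], ['block'], action_set[agent])
def feasible_actions (agent : String) (agents : List (String × List (String × String))) (action_set : List (String × List String)) (congestion : List (String × List (String × Int))) (threshold : Int) : Option (List String) :=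
  ((PySem.Dict.mk agents).get? agent).bind fun agentRec =>
  ((PySem.Dict.mk agentRec).get? "block").bind fun current_block =>
  ((PySem.Dict.mk action_set).get? agent).bind fun actions =>
  some (actions.foldl (fun feasible action =>
    if action == current_block then feasible ++ [action]
    else if (PySem.Dict.mk ((PySem.Dict.mk congestion).getD current_block [])).getD action 0 < threshold
         then feasible ++ [action]
    else feasible) [])

-- the list comprehension [feasible_actions(agent, …) for agent in agent_list] (raises ⇒ none)
def pvActionLists (agent_list : List String) (agents : List (String × List (String × String))) (action_set : List (String × List String)) (congestion : List (String × List (String × Int))) : Option (List (List String)) :=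
  match agent_list with
  | [] => some []
  | ag :: rest =>
      (feasible_actions ag agents action_set congestion 2).bind fun acts =>
      (pvActionLists rest agents action_set congestion).bind fun tl =>
      some (acts :: tl)

-- itertools.product(*lists): first list varies slowest
def pvProdAll (lists : List (List String)) : List (List String) :=
  match lists with
  | [] => [[]]
  | l :: ls => l.flatMap (fun a => (pvProdAll ls).map (fun tup => a :: tup))

def generate_all_strategy (agents : List (String × List (String × String))) (action_set : List (String × List String)) (congestion : List (String × List (String × Int))) : List (List (String × String)) :=
  let agent_list := (PySem.Dict.mk agents).keys
  match pvActionLists agent_list agents action_set congestion with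
  | none => []
  | some action_lists =>
      (pvProdAll action_lists).foldl (fun all_profiles actions =>
        all_profiles ++ [(PySem.Dict.ofList (agent_list.zip actions)).items]) []

-- ===== PORT B =====
-- the per-agent filter comprehension of Source B's action_lists loop (none ⇔ the same KeyErrors as A)
def pvFeasAlt (agent : String) (agents : List (String × List (String × String))) (action_set : List (String × List String)) (congestion : List (String × List (String × Int))) : Option (List String) :=
  ((PySem.Dict.mk agents).get? agent).bind fun agentRec =>
  ((PySem.Dict.mk agentRec).get? "block").bind fun block =>
  let cong := (PySem.Dict.mk congestion).getD block []
  ((PySem.Dict.mk action_set).get? agent).bind fun acts =>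
  some (acts.filter (fun a => a == block || decide ((PySem.Dict.mk cong).getD a 0 < 2)))

-- one step of Source B's inner loop 'rem, d = divmod(rem, len(acts)); picks.append(acts[d])'.
-- divmod/indexing are exact here: whenever the idx-loop runs total > 0, so every acts is nonempty
-- and 0 ≤ rem % len < len (the getD default is never used).
def pvDecodeStep (st : Int × List String) (acts : List String) : Int × List String :=
  (PySem.Int.floordiv st.1 (acts.length : Int),
   st.2 ++ [PySem.List.pyGetD acts (PySem.Int.mod st.1 (acts.length : Int)) ""])

def generate_all_strategy_alt (agents : List (String × List (String × String))) (action_set : List (String × List String)) (congestion : List (String × List (String × Int))) : List (List (String × String)) :=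
  let agent_list := (PySem.Dict.mk agents).keys
  match agent_list.foldl (fun st agent =>
      st.bind fun ls => (pvFeasAlt agent agents action_set congestion).map (fun acts => ls ++ [acts]))
      (some []) with
  | none => []   -- unreachable under Pre_ (the KeyError inputs are excluded)
  | some action_lists =>
      let total := action_lists.foldl (fun t acts => t * (acts.length : Int)) 1
      (PySem.List.pyRange 0 total 1).foldl (fun profiles idx =>
        let rp := action_lists.reverse.foldl pvDecodeStep (idx, [])
        profiles ++ [(PySem.Dict.ofList (agent_list.zip rp.2.reverse)).items]) []

-- ===== PRECONDITION & SPEC =====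
-- Pre_ excludes exactly the KeyError inputs: an agent record without a 'block' key, or an agent
-- missing from action_set (Python A raises KeyError there; B raises too).
def Pre_generate_all_strategy (agents : List (String × List (String × String))) (action_set : List (String × List String)) (congestion : List (String × List (String × Int))) : Prop :=
  ∀ p ∈ agents, ((PySem.Dict.mk p.2).get? "block").isSome = true ∧ ((PySem.Dict.mk action_set).get? p.1).isSome = true
instance (agents : List (String × List (String × String))) (action_set : List (String × List String)) (congestion : List (String × List (String × Int))) : Decidable (Pre_generate_all_strategy agents action_set congestion) := by unfold Pre_generate_all_strategy; infer_instance

def pvWitness_generate_all_strategy : (List (String × List (String × String))) × (List (String × List String)) × (List (String × List (String × Int))) :=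
  ([("a1", [("block", "X")]), ("a2", [("block", "Y")])],
   [("a1", ["X", "Y"]), ("a2", ["Y", "Z"])],
   [("X", [("Y", 3)])])

def Spec_generate_all_strategy (agents : List (String × List (String × String))) (action_set : List (String × List String)) (congestion : List (String × List (String × Int))) (out : List (List (String × String))) : Prop := out = generate_all_strategy_alt agents action_set congestion
instance (agents : List (String × List (String × String))) (action_set : List (String × List String)) (congestion : List (String × List (String × Int))) (out : List (List (String × String))) : Decidable (Spec_generate_all_strategy agents action_set congestion out) := by unfold Spec_generate_all_strategy; infer_instance

-- ===== CLAIM (what is proved, stated in full; the proofs are below) =====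
def Claim_equal_generate_all_strategy : Prop := ∀ (agents : List (String × List (String × String))) (action_set : List (String × List String)) (congestion : List (String × List (String × Int))), Dom_generate_all_strategy agents action_set congestion → Pre_generate_all_strategy agents action_set congestion → Spec_generate_all_strategy agents action_set congestion (generate_all_strategy agents action_set congestion)

-- ===== LEMMAS AND PROOFS =====

-- proof-side name for the mixed-radix product of the list lengths
def pvProd (ls : List (List String)) : Int := ls.foldr (fun a t => (a.length : Int) * t) 1

-- proof-side name for Source B's inner decoding loop (foldl over the reverse = foldr)
def pvCoreR (ls : List (List String)) (x : Int) : Int × List String :=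
  ls.foldr (fun a st => pvDecodeStep st a) (x, [])

lemma pv_prod_nonneg (ls : List (List String)) : 0 ≤ pvProd ls := by
  induction ls with
  | nil => norm_num [pvProd]
  | cons a ls ih => exact mul_nonneg (Int.natCast_nonneg _) ih

lemma pv_total_eq (ls : List (List String)) : ∀ t : Int,
    ls.foldl (fun t acts => t * (acts.length : Int)) t = t * pvProd ls := by
  induction ls with
  | nil => intro t; simp [pvProd]
  | cons a ls ih => intro t; simp only [List.foldl_cons, ih, pvProd, List.foldr_cons]; ring

lemma pv_prodAll_length (ls : List (List String)) : ((pvProdAll ls).length : Int) = pvProd ls := by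
  induction ls with
  | nil => simp [pvProdAll, pvProd]
  | cons a ls ih =>
    simp only [pvProdAll, pvProd, List.foldr_cons, List.length_flatMap, List.length_map]
    rw [List.map_const']
    rw [List.sum_replicate, smul_eq_mul]
    push_cast
    rw [show List.foldr (fun (a : List String) (t : Int) => (a.length : Int) * t) 1 ls = pvProd ls from rfl, ih]

lemma pv_feas_eq (agent : String) (agents : List (String × List (String × String))) (action_set : List (String × List String)) (congestion : List (String × List (String × Int))) :
    feasible_actions agent agents action_set congestion 2 = pvFeasAlt agent agents action_set congestion := by
  unfold feasible_actions pvFeasAlt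
  refine Option.bind_congr fun rec1 _ => Option.bind_congr fun blk _ => Option.bind_congr fun acts _ => ?_
  refine congrArg some ?_
  rw [PySem.List.foldl_congr_mem _ _
      (fun feasible action => if (action == blk || decide ((PySem.Dict.mk ((PySem.Dict.mk congestion).getD blk [])).getD action 0 < 2)) then feasible ++ [action] else feasible) _ ?_]
  · exact PySem.List.foldl_append_if_eq_filter _ _ _
  · intro acc x _
    by_cases h1 : (x == blk) = true
    · simp [h1]
    · by_cases h2 : (PySem.Dict.mk ((PySem.Dict.mk congestion).getD blk [])).getD x 0 < 2 <;>
        simp [h1, h2]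

lemma pv_feasLoop_none (l : List String) (agents : List (String × List (String × String))) (action_set : List (String × List String)) (congestion : List (String × List (String × Int))) :
    l.foldl (fun st agent => st.bind fun ls => (pvFeasAlt agent agents action_set congestion).map (fun acts => ls ++ [acts])) none = none := by
  induction l with
  | nil => rfl
  | cons a l ih => simpa using ih

lemma pv_feasLoop (l : List String) (agents : List (String × List (String × String))) (action_set : List (String × List String)) (congestion : List (String × List (String × Int))) : ∀ acc,
    l.foldl (fun st agent => st.bind fun ls => (pvFeasAlt agent agents action_set congestion).map (fun acts => ls ++ [acts])) (some acc)
      = (pvActionLists l agents action_set congestion).map (fun L => acc ++ L) := by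
  induction l with
  | nil => intro acc; simp [pvActionLists]
  | cons ag l ih =>
    intro acc
    simp only [List.foldl_cons, Option.bind_some]
    cases hf : pvFeasAlt ag agents action_set congestion with
    | none =>
      simp only [pvActionLists, pv_feas_eq, hf, Option.map_none]
      simp only [Option.bind]
      exact pv_feasLoop_none l agents action_set congestion
    | some acts =>
      simp only [Option.map_some]
      rw [ih (acc ++ [acts])]
      simp only [pvActionLists, pv_feas_eq, hf]
      simp only [Option.bind]
      cases pvActionLists l agents action_set congestion <;> simp

lemma pv_actionLists_some (agents : List (String × List (String × String))) (action_set : List (String × List String)) (congestion : List (String × List (String × Int))) :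
    ∀ (l : List String), (∀ ag ∈ l, (feasible_actions ag agents action_set congestion 2).isSome = true) →
      ∃ Ls, pvActionLists l agents action_set congestion = some Ls := by
  intro l
  induction l with
  | nil => intro _; exact ⟨[], rfl⟩
  | cons ag rest ih =>
    intro h
    obtain ⟨acts, hf⟩ := Option.isSome_iff_exists.mp (h ag (by simp))
    obtain ⟨tl, hr⟩ := ih (fun a ha => h a (by simp [ha]))
    exact ⟨acts :: tl, by simp [pvActionLists, hf, hr]⟩

lemma pv_core_decomp (ls : List (List String)) : ∀ (q r : Int), 0 ≤ q → 0 ≤ r → r < pvProd ls →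
    pvCoreR ls (q * pvProd ls + r) = (q, (pvCoreR ls r).2) := by
  induction ls with
  | nil =>
    intro q r hq hr0 hr1
    have : r = 0 := by simp [pvProd] at hr1; omega
    subst this
    simp [pvCoreR, pvProd]
  | cons a ls ih =>
    intro q r hq hr0 hr1
    have hn0 : (0:Int) ≤ (a.length : Int) := Int.natCast_nonneg _
    have hQ0 : 0 ≤ pvProd ls := pv_prod_nonneg ls
    have hprod : pvProd (a :: ls) = (a.length : Int) * pvProd ls := rfl
    rw [hprod] at hr1
    have hpos : 0 < (a.length : Int) * pvProd ls := lt_of_le_of_lt hr0 hr1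
    have hn : 0 < (a.length : Int) := by
      rcases mul_pos_iff.mp hpos with ⟨h, _⟩ | ⟨h, _⟩
      · exact h
      · omega
    have hQ : 0 < pvProd ls := by
      rcases mul_pos_iff.mp hpos with ⟨_, h⟩ | ⟨_, h⟩
      · exact h
      · omega
    set n := (a.length : Int) with hn_def
    set Q := pvProd ls with hQ_def
    set r1 := r / Q with hr1_def
    set r2 := r % Q with hr2_def
    have hdec : r = r1 * Q + r2 := by
      rw [hr1_def, hr2_def]; rw [mul_comm]; exact (Int.ediv_add_emod r Q).symm
    have hr2a : 0 ≤ r2 := Int.emod_nonneg r (by omega)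
    have hr2b : r2 < Q := Int.emod_lt_of_pos r hQ
    have hr1a : 0 ≤ r1 := Int.ediv_nonneg hr0 (le_of_lt hQ)
    have hr1b : r1 < n := by
      rw [hr1_def]
      exact (Int.ediv_lt_iff_lt_mul hQ).mpr hr1
    have hx : q * (n * Q) + r = (r1 + q * n) * Q + r2 := by rw [hdec]; ring
    have step_eval : ∀ (q' m : Int) (D : List String), 0 ≤ m → m < n →
        pvDecodeStep (q' * n + m, D) a = (q', D ++ [PySem.List.pyGetD a m ""]) := by
      intro q' m D hm0 hm1
      unfold pvDecodeStep
      simp only [← hn_def]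
      rw [PySem.Int.floordiv_eq_ediv_of_pos hn, PySem.Int.mod_eq_emod_of_pos hn]
      have h1 : (q' * n + m) / n = q' := by
        rw [add_comm, Int.add_mul_ediv_right m q' (by omega), Int.ediv_eq_zero_of_lt hm0 hm1]
        ring
      have h2 : (q' * n + m) % n = m := by
        rw [add_comm, Int.add_mul_emod_self_right, Int.emod_eq_of_lt hm0 hm1]
      rw [h1, h2]
    have core_cons : ∀ x : Int, pvCoreR (a :: ls) x = pvDecodeStep (pvCoreR ls x) a := by
      intro x; rfl
    rw [core_cons, core_cons, hprod, hx]
    rw [show pvCoreR ls ((r1 + q * n) * Q + r2) = ((r1 + q*n), (pvCoreR ls r2).2) from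
        ih (r1 + q * n) r2 (by positivity) hr2a hr2b]
    rw [hdec]
    rw [show pvCoreR ls (r1 * Q + r2) = (r1, (pvCoreR ls r2).2) from ih r1 r2 hr1a hr2a hr2b]
    have lhs_eq : pvDecodeStep (r1 + q * n, (pvCoreR ls r2).2) a = (q, (pvCoreR ls r2).2 ++ [PySem.List.pyGetD a r1 ""]) := by
      rw [show r1 + q * n = q * n + r1 by ring]
      exact step_eval q r1 (pvCoreR ls r2).2 hr1a hr1b
    have rhs_eq : pvDecodeStep (r1, (pvCoreR ls r2).2) a = (0, (pvCoreR ls r2).2 ++ [PySem.List.pyGetD a r1 ""]) := by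
      have h := step_eval 0 r1 (pvCoreR ls r2).2 hr1a hr1b
      simpa using h
    rw [lhs_eq, rhs_eq]

lemma pv_nat_range_mul (u v : Nat) :
    List.range (u * v) = (List.range u).flatMap (fun q => (List.range v).map (fun r => q * v + r)) := by
  induction u with
  | zero => simp
  | succ u ih =>
    rw [Nat.succ_mul, List.range_add, List.range_succ, List.flatMap_append, ih]
    simp

lemma pv_range_block (n Q : Int) (hn : 0 ≤ n) (hQ : 0 ≤ Q) :
    PySem.List.pyRange 0 (n * Q) 1 = (PySem.List.pyRange 0 n 1).flatMap (fun q => (PySem.List.pyRange 0 Q 1).map (fun r => q * Q + r)) := by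
  lift n to Nat using hn
  lift Q to Nat using hQ
  rw [show ((n : Int) * (Q : Int)) = ((n * Q : Nat) : Int) by push_cast; ring]
  rw [PySem.List.pyRange_zero_natCast, PySem.List.pyRange_zero_natCast, PySem.List.pyRange_zero_natCast]
  rw [pv_nat_range_mul]
  rw [List.map_flatMap, List.flatMap_map]
  refine List.flatMap_congr ?_
  intro q _
  simp only [List.map_map]
  refine List.map_congr_left ?_
  intro r _
  simp only [Function.comp]
  push_cast
  ring

lemma pv_map_decode (ls : List (List String)) :
    (PySem.List.pyRange 0 (pvProd ls) 1).map (fun idx => (pvCoreR ls idx).2.reverse) = pvProdAll ls := by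
  induction ls with
  | nil => decide
  | cons a ls ih =>
    have hQ0 : 0 ≤ pvProd ls := pv_prod_nonneg ls
    have hprod : pvProd (a :: ls) = (a.length : Int) * pvProd ls := rfl
    rcases eq_or_lt_of_le hQ0 with hQz | hQ
    · -- pvProd ls = 0: both sides empty
      have hlen : (pvProdAll ls).length = 0 := by
        have := pv_prodAll_length ls
        omega
      have hnil : pvProdAll ls = [] := List.eq_nil_of_length_eq_zero hlen
      rw [hprod, ← hQz, mul_zero]
      simp [pvProdAll, hnil]
    · rw [hprod, pv_range_block _ _ (Int.natCast_nonneg _) hQ0]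
      rw [List.map_flatMap]
      have key : ∀ q ∈ PySem.List.pyRange 0 ((a.length : Int)) 1,
          ((PySem.List.pyRange 0 (pvProd ls) 1).map (fun r => q * pvProd ls + r)).map (fun idx => (pvCoreR (a :: ls) idx).2.reverse)
            = (pvProdAll ls).map (fun tup => PySem.List.pyGetD a q "" :: tup) := by
        intro q hq
        obtain ⟨hq0, hq1⟩ := PySem.List.mem_pyRange_one.mp hq
        rw [List.map_map, ← ih, List.map_map]
        refine List.map_congr_left ?_
        intro r hr
        obtain ⟨hr0, hr1⟩ := PySem.List.mem_pyRange_one.mp hr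
        simp only [Function.comp]
        have core_cons : pvCoreR (a :: ls) (q * pvProd ls + r) = pvDecodeStep (pvCoreR ls (q * pvProd ls + r)) a := rfl
        rw [core_cons, pv_core_decomp ls q r hq0 hr0 hr1]
        unfold pvDecodeStep
        simp only
        have hn : (0:Int) < (a.length : Int) := by
          -- q exists in range, so 0 ≤ q < a.length
          omega
        rw [PySem.Int.mod_eq_emod_of_pos hn, Int.emod_eq_of_lt hq0 hq1]
        simp
      rw [List.flatMap_congr key]
      -- now: flatMap over indices of a = flatMap over elements of a
      have ha : (PySem.List.pyRange 0 ((a.length : Int)) 1).map (fun j => PySem.List.pyGetD a j "") = a :=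
        PySem.List.map_pyGetD_pyRange_zero' a ""
      calc (PySem.List.pyRange 0 ((a.length : Int)) 1).flatMap
              (fun q => (pvProdAll ls).map (fun tup => PySem.List.pyGetD a q "" :: tup))
          = ((PySem.List.pyRange 0 ((a.length : Int)) 1).map (fun j => PySem.List.pyGetD a j "")).flatMap
              (fun x => (pvProdAll ls).map (fun tup => x :: tup)) := by
            rw [List.flatMap_map]
        _ = a.flatMap (fun x => (pvProdAll ls).map (fun tup => x :: tup)) := by rw [ha]
        _ = pvProdAll (a :: ls) := rfl

-- ===== VERDICT (by name: the statement is the Claim_ definition above) =====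
theorem generate_all_strategy_spec : Claim_equal_generate_all_strategy := by
  intro agents action_set congestion hdom hpre
  unfold Spec_generate_all_strategy
  simp only [generate_all_strategy, generate_all_strategy_alt]
  have hsucc : ∀ ag ∈ (PySem.Dict.mk agents).keys, (feasible_actions ag agents action_set congestion 2).isSome = true := by
    intro ag hag
    have hcont : (PySem.Dict.mk agents).contains ag = true := (PySem.Dict.contains_iff_mem_keys _ _).mpr hag
    rw [PySem.Dict.contains_eq_isSome_get?] at hcont
    obtain ⟨rec1, hget⟩ := Option.isSome_iff_exists.mp hcont
    have hmem : (ag, rec1) ∈ (PySem.Dict.mk agents).items := PySem.Dict.mem_items_of_get?_eq_some _ hget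
    have hmem' : (ag, rec1) ∈ agents := hmem
    obtain ⟨hb, ha⟩ := hpre (ag, rec1) hmem'
    obtain ⟨blk, hblk⟩ := Option.isSome_iff_exists.mp hb
    obtain ⟨acts, hacts⟩ := Option.isSome_iff_exists.mp ha
    unfold feasible_actions
    rw [hget]
    simp [hblk, hacts]
  obtain ⟨L, hL⟩ := pv_actionLists_some agents action_set congestion _ hsucc
  rw [pv_feasLoop _ agents action_set congestion [], hL]
  simp only [Option.map_some, List.nil_append]
  rw [PySem.List.foldl_append_singleton_eq_map, List.nil_append]
  rw [pv_total_eq, one_mul]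
  rw [PySem.List.foldl_append_singleton_eq_map, List.nil_append]
  have hbody : ∀ idx : Int,
      (PySem.Dict.ofList ((PySem.Dict.mk agents).keys.zip ((L.reverse.foldl pvDecodeStep (idx, [])).2.reverse))).items
        = (PySem.Dict.ofList ((PySem.Dict.mk agents).keys.zip ((pvCoreR L idx).2.reverse))).items := by
    intro idx
    rw [List.foldl_reverse]
    rfl
  calc (pvProdAll L).map (fun actions => (PySem.Dict.ofList ((PySem.Dict.mk agents).keys.zip actions)).items)
      = ((PySem.List.pyRange 0 (pvProd L) 1).map (fun idx => (pvCoreR L idx).2.reverse)).map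
          (fun actions => (PySem.Dict.ofList ((PySem.Dict.mk agents).keys.zip actions)).items) := by
        rw [pv_map_decode]
    _ = (PySem.List.pyRange 0 (pvProd L) 1).map
          (fun idx => (PySem.Dict.ofList ((PySem.Dict.mk agents).keys.zip ((L.reverse.foldl pvDecodeStep (idx, [])).2.reverse))).items) := by
        rw [List.map_map]
        exact List.map_congr_left (fun idx _ => (hbody idx).symm)
    _ = _ := rfl
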